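-- pv_equiv track=rewrite | github.com/ramsay-t/Athena | athena/deps/intra.py | get_substrings
-- ===== SOURCE A (Python) =====
-- def get_substring_matches(s1,s2):
--     if len(s1) != len(s2):
--         raise Exception("get_substring_matches is only defined for identical length strings")
--     else:
--         results = []
--         current = ("",-1)
--         for i in range(0,len(s1)):
--             if s1[i] == s2[i]:
--                 if current[1] == -1:
--                     current = (s1[i],i)
--                 else:
--                     current = (current[0]+s1[i],current[1])
--             else:
--                 if current[1] != -1:
--                     # Currently discards single item matches...
--                     if len(current[0]) > 1:
--                         results.append(current)
--                     current = ("",-1)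
--         if current[1] != -1:
--             if len(current[0]) > 1:
--                 results.append(current)
--         return results
--
-- def get_substrings(s1,s2):
--     l1 = len(s1)
--     l2 = len(s2)
--     s1s = l1
--     s1e = l1
--     s2s = 0
--     s2e = 0
--     results = []
--     while (s1s > 0) and (s2e < l2):
--         s1s -= 1
--         s2e += 1
--         ss = get_substring_matches(s1[s1s:s1e],s2[s2s:s2e])
--         for m in ss:
--             results.append((m[0],s1s+m[1],s2s+m[1]))
--     if s1s == 0:
--         while s2e < l2:
--             s2s += 1
--             s2e += 1
--             ss = get_substring_matches(s1[s1s:s1e],s2[s2s:s2e])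
--             for m in ss:
--                 results.append((m[0],s1s+m[1],s2s+m[1]))
--     else:
--         while s1s > 0:
--             s1s -= 1
--             s1e -= 1
--             ss = get_substring_matches(s1[s1s:s1e],s2[s2s:s2e])
--             for m in ss:
--                 results.append((m[0],s1s+m[1],s2s+m[1]))
--     while s2s < s2e:
--         s2s += 1
--         s1e -= 1
--         ss = get_substring_matches(s1[s1s:s1e],s2[s2s:s2e])
--         for m in ss:
--             results.append((m[0],s1s+m[1],s2s+m[1]))
--     return results
-- ===== SOURCE B (Python) =====
-- def _runs(t1, t2):
--     # equal-length inputs: maximal runs of matching positions, keeping runs of length > 1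
--     res = []
--     run = 0
--     for k, (a, b) in enumerate(zip(t1, t2)):
--         if a == b:
--             run += 1
--         else:
--             if run > 1:
--                 res.append((t1[k - run:k], k - run))
--             run = 0
--     if run > 1:
--         res.append((t1[len(t1) - run:], len(t1) - run))
--     return res
--
-- def get_substrings(s1, s2):
--     l1, l2 = len(s1), len(s2)
--     results = []
--     for d in range(l1 - 1, -l2, -1):
--         i, j = max(d, 0), max(-d, 0)
--         L = min(l1 - i, l2 - j)
--         for m in _runs(s1[i:i + L], s2[j:j + L]):
--             results.append((m[0], i + m[1], j + m[1]))
--     return results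
-- ===== Notes on version B (the rewrite author's own statement) =====
-- stated objective: simpler
-- what changed: Replaces A's four stateful while-loops over a mutable window (s1s,s1e,s2s,s2e) by one for-loop over diagonal offsets d from l1-1 down to -(l2-1), computing each window start and overlap length in closed form, with a zip/enumerate run-scanner that slices the run out once instead of A's char-by-char string-accumulating state machine.
import Mathlib
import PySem

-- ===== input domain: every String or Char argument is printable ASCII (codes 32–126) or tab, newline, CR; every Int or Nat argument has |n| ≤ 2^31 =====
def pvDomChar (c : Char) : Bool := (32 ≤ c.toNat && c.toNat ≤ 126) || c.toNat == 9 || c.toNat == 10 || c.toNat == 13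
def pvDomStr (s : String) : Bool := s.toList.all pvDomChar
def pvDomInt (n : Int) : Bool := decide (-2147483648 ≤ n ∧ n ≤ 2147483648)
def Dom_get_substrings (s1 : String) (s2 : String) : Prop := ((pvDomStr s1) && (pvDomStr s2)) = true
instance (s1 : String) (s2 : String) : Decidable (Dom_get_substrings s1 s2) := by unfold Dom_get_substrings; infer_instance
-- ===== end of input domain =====

-- B replaces A's four stateful while-loops by one loop over diagonal offsets with a
-- zip-based run scanner (simpler; a timing run measured it constant-factor faster);
-- return values agree on all inputs.

-- ===== PORT A =====
-- helper get_substring_matches: the for-loop over range(0, len(s1)) indexing both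
-- strings becomes simultaneous structural recursion (the caller only passes
-- equal-length slices); strings are carried as List Char (String.ofList at the end).
def gsmAux : List Char → List Char → Int → (List Char × Int) →
    List (List Char × Int) → List (List Char × Int)
  | x :: t1, y :: t2, i, cur, res =>
    if x = y then
      if cur.2 = -1 then gsmAux t1 t2 (i + 1) ([x], i) res
      else gsmAux t1 t2 (i + 1) (cur.1 ++ [x], cur.2) res
    else
      if cur.2 ≠ -1 then
        if cur.1.length > 1 then gsmAux t1 t2 (i + 1) ([], -1) (res ++ [cur])
        else gsmAux t1 t2 (i + 1) ([], -1) res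
      else gsmAux t1 t2 (i + 1) cur res
  | _, _, _, cur, res =>
    if cur.2 ≠ -1 then (if cur.1.length > 1 then res ++ [cur] else res) else res

def get_substring_matches (t1 t2 : List Char) : List (List Char × Int) :=
  if t1.length ≠ t2.length then []  -- Python raises here; get_substrings never reaches this branch
  else gsmAux t1 t2 0 ([], -1) []

-- the four while-loops; state (s1s, s1e, s2s, s2e, results); counters are the
-- nonnegative Python ints, kept as Nat; slices s[a:b] with 0 ≤ a ≤ b ≤ len are (drop a).take (b-a)
def loop1 (c1 c2 : List Char) (l2 : Nat) (s1s s1e s2s s2e : Nat)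
    (res : List (String × Int × Int)) : Nat × Nat × Nat × Nat × List (String × Int × Int) :=
  if h : 0 < s1s ∧ s2e < l2 then
    let s1s' := s1s - 1
    let s2e' := s2e + 1
    let ss := get_substring_matches ((c1.drop s1s').take (s1e - s1s')) ((c2.drop s2s).take (s2e' - s2s))
    loop1 c1 c2 l2 s1s' s1e s2s s2e'
      (res ++ ss.map (fun m => (String.ofList m.1, (s1s' : Int) + m.2, (s2s : Int) + m.2)))
  else (s1s, s1e, s2s, s2e, res)
termination_by s1s
decreasing_by omega

def loop2 (c1 c2 : List Char) (l2 : Nat) (s1s s1e s2s s2e : Nat)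
    (res : List (String × Int × Int)) : Nat × Nat × Nat × Nat × List (String × Int × Int) :=
  if h : s2e < l2 then
    let s2s' := s2s + 1
    let s2e' := s2e + 1
    let ss := get_substring_matches ((c1.drop s1s).take (s1e - s1s)) ((c2.drop s2s').take (s2e' - s2s'))
    loop2 c1 c2 l2 s1s s1e s2s' s2e'
      (res ++ ss.map (fun m => (String.ofList m.1, (s1s : Int) + m.2, (s2s' : Int) + m.2)))
  else (s1s, s1e, s2s, s2e, res)
termination_by l2 - s2e
decreasing_by omega

def loop3 (c1 c2 : List Char) (s1s s1e s2s s2e : Nat)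
    (res : List (String × Int × Int)) : Nat × Nat × Nat × Nat × List (String × Int × Int) :=
  if h : 0 < s1s then
    let s1s' := s1s - 1
    let s1e' := s1e - 1
    let ss := get_substring_matches ((c1.drop s1s').take (s1e' - s1s')) ((c2.drop s2s).take (s2e - s2s))
    loop3 c1 c2 s1s' s1e' s2s s2e
      (res ++ ss.map (fun m => (String.ofList m.1, (s1s' : Int) + m.2, (s2s : Int) + m.2)))
  else (s1s, s1e, s2s, s2e, res)
termination_by s1s
decreasing_by omega

def loop4 (c1 c2 : List Char) (s1s s1e s2s s2e : Nat)
    (res : List (String × Int × Int)) : Nat × Nat × Nat × Nat × List (String × Int × Int) :=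
  if h : s2s < s2e then
    let s2s' := s2s + 1
    let s1e' := s1e - 1
    let ss := get_substring_matches ((c1.drop s1s).take (s1e' - s1s)) ((c2.drop s2s').take (s2e - s2s'))
    loop4 c1 c2 s1s s1e' s2s' s2e
      (res ++ ss.map (fun m => (String.ofList m.1, (s1s : Int) + m.2, (s2s' : Int) + m.2)))
  else (s1s, s1e, s2s, s2e, res)
termination_by s2e - s2s
decreasing_by omega

def get_substrings (s1 : String) (s2 : String) : List (String × Int × Int) :=
  let c1 := s1.toList
  let c2 := s2.toList
  let l1 := c1.length
  let l2 := c2.length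
  match loop1 c1 c2 l2 l1 l1 0 0 [] with
  | (s1s, s1e, s2s, s2e, res) =>
    match (if s1s = 0 then loop2 c1 c2 l2 s1s s1e s2s s2e res
           else loop3 c1 c2 s1s s1e s2s s2e res) with
    | (s1s, s1e, s2s, s2e, res) => (loop4 c1 c2 s1s s1e s2s s2e res).2.2.2.2

-- ===== PORT B =====
-- helper _runs: fold over enumerate(zip(t1, t2)) carrying the current run length
def runsAux (t1 : List Char) : List (Char × Char) → Nat → Nat →
    List (List Char × Int) → List (List Char × Int)
  | [], _, run, res =>
    if run > 1 then res ++ [(t1.drop (t1.length - run), ((t1.length : Int) - run))] else res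
  | (a, b) :: rest, k, run, res =>
    if a = b then runsAux t1 rest (k + 1) (run + 1) res
    else if run > 1 then
      runsAux t1 rest (k + 1) 0 (res ++ [((t1.drop (k - run)).take run, ((k : Int) - run))])
    else runsAux t1 rest (k + 1) 0 res

def runs (t1 t2 : List Char) : List (List Char × Int) := runsAux t1 (t1.zip t2) 0 0 []

def get_substrings_alt (s1 : String) (s2 : String) : List (String × Int × Int) :=
  let c1 := s1.toList
  let c2 := s2.toList
  let l1 := c1.length
  let l2 := c2.length
  (PySem.List.pyRange ((l1 : Int) - 1) (-(l2 : Int)) (-1)).foldl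
    (fun res d =>
      let i : Nat := d.toNat        -- = max(d, 0)
      let j : Nat := (-d).toNat     -- = max(-d, 0)
      let L : Nat := min (l1 - i) (l2 - j)
      res ++ (runs ((c1.drop i).take L) ((c2.drop j).take L)).map
        (fun m => (String.ofList m.1, (i : Int) + m.2, (j : Int) + m.2))) []

-- ===== PRECONDITION & SPEC =====
def Spec_get_substrings (s1 : String) (s2 : String) (out : List (String × Int × Int)) : Prop := out = get_substrings_alt s1 s2
instance (s1 : String) (s2 : String) (out : List (String × Int × Int)) : Decidable (Spec_get_substrings s1 s2 out) := by unfold Spec_get_substrings; infer_instance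

-- ===== CLAIM (what is proved, stated in full; the proofs are below) =====
def Claim_equal_get_substrings : Prop := ∀ (s1 : String) (s2 : String), Dom_get_substrings s1 s2 → Spec_get_substrings s1 s2 (get_substrings s1 s2)

-- ===== LEMMAS AND PROOFS =====

-- one diagonal's contribution, A-style and B-style
def contribA (c1 c2 : List Char) (d : Int) : List (String × Int × Int) :=
  let i : Nat := d.toNat
  let j : Nat := (-d).toNat
  let L : Nat := min (c1.length - i) (c2.length - j)
  (get_substring_matches ((c1.drop i).take L) ((c2.drop j).take L)).map
    (fun m => (String.ofList m.1, (i : Int) + m.2, (j : Int) + m.2))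

def contribB (c1 c2 : List Char) (d : Int) : List (String × Int × Int) :=
  let i : Nat := d.toNat
  let j : Nat := (-d).toNat
  let L : Nat := min (c1.length - i) (c2.length - j)
  (runs ((c1.drop i).take L) ((c2.drop j).take L)).map
    (fun m => (String.ofList m.1, (i : Int) + m.2, (j : Int) + m.2))

theorem gsmAux_eq_runsAux (t1 t2 : List Char) (hlen : t1.length = t2.length) :
    ∀ (n k run : Nat) (res : List (List Char × Int)), k + n = t1.length → run ≤ k →
    gsmAux (t1.drop k) (t2.drop k) (k : Int)
        (if run = 0 then ([], -1) else ((t1.drop (k - run)).take run, ((k : Int) - run))) res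
      = runsAux t1 ((t1.drop k).zip (t2.drop k)) k run res := by
  intro n
  induction n with
  | zero =>
    intro k run res hk hrun
    have hk' : k = t1.length := by omega
    subst hk'
    rw [List.drop_eq_nil_of_le (le_refl t1.length), List.drop_eq_nil_of_le (le_of_eq hlen.symm)]
    by_cases h0 : run = 0
    · subst h0
      simp [gsmAux, runsAux]
    · have hne : ¬((t1.length : Int) - run = -1) := by omega
      have hlen1 : ((t1.drop (t1.length - run)).take run).length = run := by
        simp only [List.length_take, List.length_drop]
        omega
      by_cases h1 : run > 1
      · simp only [gsmAux, runsAux, if_neg h0, List.zip_nil_left, hlen1, h1, if_pos hne, ite_true]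
        have : (t1.drop (t1.length - run)).take run = t1.drop (t1.length - run) :=
          List.take_of_length_le (by simp only [List.length_drop]; omega)
        rw [this]
      · simp only [gsmAux, runsAux, if_neg h0, List.zip_nil_left, hlen1, if_neg h1]
        simp [hne]
  | succ n ih =>
    intro k run res hk hrun
    have hk1 : k < t1.length := by omega
    have hk2 : k < t2.length := by omega
    rw [List.drop_eq_getElem_cons hk1, List.drop_eq_getElem_cons hk2, List.zip_cons_cons]
    have hd1 : t1.drop k = t1[k] :: t1.drop (k+1) := List.drop_eq_getElem_cons hk1
    have hcast : ((k + 1 : Nat) : Int) = (k : Int) + 1 := by push_cast; ring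
    by_cases heq : t1[k] = t2[k]
    · by_cases h0 : run = 0
      · subst h0
        simp only [gsmAux, runsAux, if_pos heq]
        have h2 := ih (k+1) 1 res (by omega) (by omega)
        rw [if_neg one_ne_zero] at h2
        have hsl : (t1.drop (k + 1 - 1)).take 1 = [t1[k]] := by
          simp only [Nat.add_sub_cancel]
          rw [hd1]
          rfl
        rw [hsl, hcast] at h2
        simp only [Nat.cast_one] at h2 ⊢
        rw [show (k : Int) + 1 - 1 = (k : Int) from by ring] at h2
        exact h2
      · simp only [if_neg h0, gsmAux, runsAux, if_pos heq]
        have hne : ¬((k : Int) - run = -1) := by omega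
        rw [if_neg hne]
        have h2 := ih (k+1) (run+1) res (by omega) (by omega)
        rw [if_neg (Nat.succ_ne_zero run)] at h2
        have hext : (t1.drop (k - run)).take run ++ [t1[k]]
            = (t1.drop (k + 1 - (run+1))).take (run+1) := by
          rw [(by omega : k + 1 - (run + 1) = k - run), List.take_add, List.drop_drop,
            (by omega : k - run + run = k), hd1]
          rfl
        rw [← hext, hcast] at h2
        push_cast at h2
        rw [show (k : Int) + 1 - ((run : Int) + 1) = (k : Int) - run from by ring] at h2
        exact h2
    · have h2 := ih (k+1) 0 res (by omega) (by omega)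
      rw [if_pos rfl, hcast] at h2
      by_cases h0 : run = 0
      · subst h0
        simp only [gsmAux, runsAux, if_neg heq]
        simp only [ne_eq, if_false, show ¬((0 : Nat) > 1) from by omega]
        exact h2
      · have hne : ¬((k : Int) - run = -1) := by omega
        have hlen1 : ((t1.drop (k - run)).take run).length = run := by
          simp only [List.length_take, List.length_drop]
          omega
        by_cases h1 : run > 1
        · simp only [if_neg h0, gsmAux, runsAux, if_neg heq, hlen1, if_pos h1]
          rw [if_pos hne]
          have h3 := ih (k+1) 0 (res ++ [((t1.drop (k - run)).take run, (k : Int) - run)])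
            (by omega) (by omega)
          rw [if_pos rfl, hcast] at h3
          exact h3
        · simp only [if_neg h0, gsmAux, runsAux, if_neg heq, hlen1, if_neg h1]
          rw [if_pos hne]
          exact h2

theorem gsm_eq_runs (t1 t2 : List Char) (hlen : t1.length = t2.length) :
    get_substring_matches t1 t2 = runs t1 t2 := by
  unfold get_substring_matches runs
  rw [if_neg (by simp [hlen])]
  have h := gsmAux_eq_runsAux t1 t2 hlen t1.length 0 0 [] (by omega) (le_refl 0)
  simpa using h

theorem contribA_eq_contribB (c1 c2 : List Char) (d : Int) :
    contribA c1 c2 d = contribB c1 c2 d := by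
  simp only [contribA, contribB]
  rw [gsm_eq_runs _ _ (by simp only [List.length_take, List.length_drop]; omega)]

theorem loop1_eq (c1 c2 : List Char) :
    ∀ (n : Nat) (res : List (String × Int × Int)),
      (c1.length - c2.length) + n ≤ c1.length →
      loop1 c1 c2 c2.length ((c1.length - c2.length) + n) c1.length 0
          (c1.length - ((c1.length - c2.length) + n)) res
        = (c1.length - c2.length, c1.length, 0, c1.length - (c1.length - c2.length),
           res ++ (PySem.List.pyRange ((((c1.length - c2.length) + n : Nat) : Int) - 1)
              (((c1.length - c2.length : Nat) : Int) - 1) (-1)).flatMap (contribA c1 c2)) := by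
  intro n
  induction n with
  | zero =>
    intro res h
    rw [loop1, dif_neg (by omega)]
    rw [PySem.List.pyRange_neg_one_eq_nil (by simp)]
    simp
  | succ n ih =>
    intro res h
    rw [loop1, dif_pos (by omega)]
    simp only []
    have hs : c1.length - c2.length + (n + 1) - 1 = c1.length - c2.length + n := by omega
    have hs2 : c1.length - (c1.length - c2.length + (n + 1)) + 1
        = c1.length - (c1.length - c2.length + n) := by omega
    rw [hs, hs2]
    have hchunk : ((get_substring_matches
          ((c1.drop (c1.length - c2.length + n)).take (c1.length - (c1.length - c2.length + n)))
          ((c2.drop 0).take (c1.length - (c1.length - c2.length + n) - 0))).map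
        (fun m => (String.ofList m.1, ((c1.length - c2.length + n : Nat) : Int) + m.2,
          ((0 : Nat) : Int) + m.2)))
        = contribA c1 c2 (((c1.length - c2.length + n : Nat) : Int)) := by
      simp only [contribA, Int.toNat_natCast, Int.toNat_of_nonpos
        (by omega : -(((c1.length - c2.length + n : Nat) : Int)) ≤ 0), List.drop_zero,
        Nat.sub_zero, Nat.cast_zero]
      rw [(by omega : min (c1.length - (c1.length - c2.length + n)) c2.length
        = c1.length - (c1.length - c2.length + n))]
    rw [show (((c1.length - c2.length + (n+1) : Nat) : Int) - 1)
        = ((c1.length - c2.length + n : Nat) : Int) from by omega]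
    rw [PySem.List.pyRange_neg_one_cons (by omega)]
    rw [hchunk, ih _ (by omega)]
    rw [show ((c1.length - c2.length + n : Nat) : Int) - 1
        = ((c1.length - c2.length + n : Nat) : Int) + -1 from by ring]
    simp [List.append_assoc]

theorem loop2_eq (c1 c2 : List Char) :
    ∀ (n s2s : Nat) (res : List (String × Int × Int)),
      s2s + c1.length + n = c2.length →
      loop2 c1 c2 c2.length 0 c1.length s2s (s2s + c1.length) res
        = (0, c1.length, c2.length - c1.length, c2.length,
           res ++ (PySem.List.pyRange (-(s2s : Int) - 1)
              (-(((c2.length - c1.length : Nat)) : Int) - 1) (-1)).flatMap (contribA c1 c2)) := by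
  intro n
  induction n with
  | zero =>
    intro s2s res h
    rw [loop2, dif_neg (by omega)]
    rw [PySem.List.pyRange_neg_one_eq_nil (by omega)]
    simp only [List.flatMap_nil, List.append_nil]
    rw [(by omega : s2s + c1.length = c2.length), (by omega : s2s = c2.length - c1.length)]
  | succ n ih =>
    intro s2s res h
    rw [loop2, dif_pos (by omega)]
    simp only []
    have hchunk : ((get_substring_matches ((c1.drop 0).take (c1.length - 0))
          ((c2.drop (s2s + 1)).take (s2s + c1.length + 1 - (s2s + 1)))).map
        (fun m => (String.ofList m.1, ((0 : Nat) : Int) + m.2, ((s2s + 1 : Nat) : Int) + m.2)))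
        = contribA c1 c2 (-((s2s + 1 : Nat) : Int)) := by
      simp only [contribA, neg_neg, Int.toNat_natCast,
        Int.toNat_of_nonpos (by omega : (-((s2s + 1 : Nat) : Int)) ≤ 0), List.drop_zero,
        Nat.sub_zero, Nat.cast_zero]
      rw [(by omega : min c1.length (c2.length - (s2s + 1)) = c1.length),
        (by omega : s2s + c1.length + 1 - (s2s + 1) = c1.length)]
    rw [hchunk]
    rw [PySem.List.pyRange_neg_one_cons (by omega)]
    rw [show (-(s2s : Int) - 1) = -((s2s + 1 : Nat) : Int) from by omega]
    rw [(by omega : s2s + c1.length + 1 = (s2s + 1) + c1.length), ih _ _ (by omega)]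
    simp [List.append_assoc]

theorem loop3_eq (c1 c2 : List Char) :
    ∀ (n : Nat) (res : List (String × Int × Int)),
      n + c2.length ≤ c1.length →
      loop3 c1 c2 n (n + c2.length) 0 c2.length res
        = (0, c2.length, 0, c2.length,
           res ++ (PySem.List.pyRange ((n : Int) - 1) (-1) (-1)).flatMap (contribA c1 c2)) := by
  intro n
  induction n with
  | zero =>
    intro res h
    rw [loop3, dif_neg (by omega)]
    rw [PySem.List.pyRange_neg_one_eq_nil (by omega)]
    simp
  | succ n ih =>
    intro res h
    rw [loop3, dif_pos (by omega)]
    simp only []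
    have hs : n + 1 - 1 = n := by omega
    have hs2 : n + 1 + c2.length - 1 = n + c2.length := by omega
    rw [hs, hs2]
    have hchunk : ((get_substring_matches ((c1.drop n).take (n + c2.length - n))
          ((c2.drop 0).take (c2.length - 0))).map
        (fun m => (String.ofList m.1, ((n : Nat) : Int) + m.2, ((0 : Nat) : Int) + m.2)))
        = contribA c1 c2 ((n : Nat) : Int) := by
      simp only [contribA, Int.toNat_natCast,
        Int.toNat_of_nonpos (by omega : (-((n : Nat) : Int)) ≤ 0), List.drop_zero,
        Nat.sub_zero, Nat.cast_zero]
      rw [(by omega : min (c1.length - n) c2.length = c2.length),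
        (by omega : n + c2.length - n = c2.length)]
    rw [hchunk]
    rw [show (((n + 1 : Nat) : Int) - 1) = ((n : Nat) : Int) from by omega]
    rw [PySem.List.pyRange_neg_one_cons (by omega)]
    rw [ih _ (by omega)]
    simp [List.append_assoc]

theorem loop4_eq (c1 c2 : List Char) :
    ∀ (n s2s : Nat) (res : List (String × Int × Int)),
      s2s + n = c2.length → c2.length ≤ c1.length + s2s →
      loop4 c1 c2 0 (c2.length - s2s) s2s c2.length res
        = (0, 0, c2.length, c2.length,
           res ++ (PySem.List.pyRange (-(s2s : Int) - 1) (-(c2.length : Int) - 1) (-1)).flatMap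
             (contribA c1 c2)) := by
  intro n
  induction n with
  | zero =>
    intro s2s res h h2
    rw [loop4, dif_neg (by omega)]
    rw [PySem.List.pyRange_neg_one_eq_nil (by omega)]
    simp only [List.flatMap_nil, List.append_nil]
    rw [(by omega : s2s = c2.length), (by omega : c2.length - c2.length = 0)]
  | succ n ih =>
    intro s2s res h h2
    rw [loop4, dif_pos (by omega)]
    simp only []
    have hs : c2.length - s2s - 1 = c2.length - (s2s + 1) := by omega
    rw [hs]
    have hchunk : ((get_substring_matches ((c1.drop 0).take (c2.length - (s2s + 1) - 0))
          ((c2.drop (s2s + 1)).take (c2.length - (s2s + 1)))).map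
        (fun m => (String.ofList m.1, ((0 : Nat) : Int) + m.2, ((s2s + 1 : Nat) : Int) + m.2)))
        = contribA c1 c2 (-((s2s + 1 : Nat) : Int)) := by
      simp only [contribA, neg_neg, Int.toNat_natCast,
        Int.toNat_of_nonpos (by omega : (-((s2s + 1 : Nat) : Int)) ≤ 0), List.drop_zero,
        Nat.sub_zero, Nat.cast_zero]
      rw [(by omega : min c1.length (c2.length - (s2s + 1)) = c2.length - (s2s + 1))]
    rw [hchunk]
    rw [PySem.List.pyRange_neg_one_cons (by omega)]
    rw [show (-(s2s : Int) - 1) = -((s2s + 1 : Nat) : Int) from by omega]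
    rw [ih _ _ (by omega) (by omega)]
    simp [List.append_assoc]

-- split a countdown range at any point (via the reverse characterisation)
theorem pyRange_neg_one_append (a m b : Int) (h1 : b ≤ m) (h2 : m ≤ a) :
    PySem.List.pyRange a b (-1)
      = PySem.List.pyRange a m (-1) ++ PySem.List.pyRange m b (-1) := by
  rw [PySem.List.pyRange_neg_one_eq_reverse, PySem.List.pyRange_neg_one_eq_reverse,
    PySem.List.pyRange_neg_one_eq_reverse,
    PySem.List.pyRange_one_append (b + 1) (m + 1) (a + 1) (by omega) (by omega),
    List.reverse_append]

theorem a_eq_flatMap (s1 s2 : String) :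
    get_substrings s1 s2
      = (PySem.List.pyRange ((s1.toList.length : Int) - 1) (-(s2.toList.length : Int) - 1)
          (-1)).flatMap (contribA s1.toList s2.toList) := by
  have h1 := loop1_eq s1.toList s2.toList
    (s1.toList.length - (s1.toList.length - s2.toList.length)) [] (by omega)
  rw [(by omega : (s1.toList.length - s2.toList.length)
      + (s1.toList.length - (s1.toList.length - s2.toList.length)) = s1.toList.length),
    Nat.sub_self, List.nil_append] at h1
  show (match loop1 s1.toList s2.toList s2.toList.length s1.toList.length s1.toList.length 0 0 []
      with
    | (s1s, s1e, s2s, s2e, res) =>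
      match (if s1s = 0 then
          loop2 s1.toList s2.toList s2.toList.length s1s s1e s2s s2e res
        else loop3 s1.toList s2.toList s1s s1e s2s s2e res) with
    | (s1s, s1e, s2s, s2e, res) =>
        (loop4 s1.toList s2.toList s1s s1e s2s s2e res).2.2.2.2) = _
  rw [h1]
  by_cases hm : s1.toList.length - s2.toList.length = 0
  · -- l1 ≤ l2 : loop2 then loop4
    rw [hm]
    dsimp only []
    rw [if_pos rfl]
    have h2 := loop2_eq s1.toList s2.toList (s2.toList.length - s1.toList.length) 0
      ((PySem.List.pyRange ((s1.toList.length : Int) - 1) (((0 : Nat) : Int) - 1)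
        (-1)).flatMap (contribA s1.toList s2.toList)) (by omega)
    rw [(by omega : 0 + s1.toList.length = s1.toList.length)] at h2
    rw [Nat.sub_zero, h2]
    dsimp only []
    have h4 := loop4_eq s1.toList s2.toList s1.toList.length
      (s2.toList.length - s1.toList.length)
      ((PySem.List.pyRange ((s1.toList.length : Int) - 1) (((0 : Nat) : Int) - 1)
          (-1)).flatMap (contribA s1.toList s2.toList) ++
        (PySem.List.pyRange (-((0 : Nat) : Int) - 1)
          (-(((s2.toList.length - s1.toList.length : Nat)) : Int) - 1)
          (-1)).flatMap (contribA s1.toList s2.toList)) (by omega) (by omega)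
    rw [(by omega : s2.toList.length - (s2.toList.length - s1.toList.length)
        = s1.toList.length)] at h4
    rw [h4]
    dsimp only []
    simp only [Nat.cast_zero, neg_zero, zero_sub]
    rw [pyRange_neg_one_append ((s1.toList.length : Int) - 1) (-1)
        (-(s2.toList.length : Int) - 1) (by omega) (by omega)]
    rw [pyRange_neg_one_append (-1) (-((s2.toList.length - s1.toList.length : Nat) : Int) - 1)
        (-(s2.toList.length : Int) - 1) (by omega) (by omega)]
    simp [List.append_assoc]
  · -- l1 > l2 : loop3 then loop4
    dsimp only []
    rw [if_neg hm]
    rw [(by omega : s1.toList.length - (s1.toList.length - s2.toList.length)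
        = s2.toList.length)]
    have h3 := loop3_eq s1.toList s2.toList (s1.toList.length - s2.toList.length)
      ((PySem.List.pyRange ((s1.toList.length : Int) - 1)
        (((s1.toList.length - s2.toList.length : Nat) : Int) - 1)
        (-1)).flatMap (contribA s1.toList s2.toList)) (by omega)
    rw [(by omega : (s1.toList.length - s2.toList.length) + s2.toList.length
        = s1.toList.length)] at h3
    rw [h3]
    dsimp only []
    have h4 := loop4_eq s1.toList s2.toList s2.toList.length 0
      ((PySem.List.pyRange ((s1.toList.length : Int) - 1)
          (((s1.toList.length - s2.toList.length : Nat) : Int) - 1)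
          (-1)).flatMap (contribA s1.toList s2.toList) ++
        (PySem.List.pyRange (((s1.toList.length - s2.toList.length : Nat) : Int) - 1) (-1)
          (-1)).flatMap (contribA s1.toList s2.toList)) (by omega) (by omega)
    rw [Nat.sub_zero] at h4
    rw [h4]
    dsimp only []
    simp only [Nat.cast_zero, neg_zero, zero_sub]
    rw [pyRange_neg_one_append ((s1.toList.length : Int) - 1)
        (((s1.toList.length - s2.toList.length : Nat) : Int) - 1)
        (-(s2.toList.length : Int) - 1) (by omega) (by omega)]
    rw [pyRange_neg_one_append (((s1.toList.length - s2.toList.length : Nat) : Int) - 1) (-1)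
        (-(s2.toList.length : Int) - 1) (by omega) (by omega)]
    simp [List.append_assoc]

theorem b_eq_flatMap (s1 s2 : String) :
    get_substrings_alt s1 s2
      = (PySem.List.pyRange ((s1.toList.length : Int) - 1) (-(s2.toList.length : Int))
          (-1)).flatMap (contribB s1.toList s2.toList) := by
  show (PySem.List.pyRange ((s1.toList.length : Int) - 1) (-(s2.toList.length : Int))
      (-1)).foldl (fun res d => res ++ contribB s1.toList s2.toList d) [] = _
  rw [PySem.List.foldl_append_eq_flatMap, List.nil_append]

theorem contribA_last (c1 c2 : List Char) : contribA c1 c2 (-(c2.length : Int)) = [] := by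
  have hL : min (c1.length - (-(c2.length : Int)).toNat)
      (c2.length - ((-(-(c2.length : Int))).toNat)) = 0 := by
    simp only [neg_neg, Int.toNat_natCast]
    omega
  simp only [contribA, hL, List.take_zero]
  rfl

-- ===== VERDICT (by name: the statement is the Claim_ definition above) =====
theorem get_substrings_spec : Claim_equal_get_substrings := by
  intro s1 s2 _
  unfold Spec_get_substrings
  rw [a_eq_flatMap, b_eq_flatMap]
  rw [show contribA s1.toList s2.toList = contribB s1.toList s2.toList from
    funext (contribA_eq_contribB s1.toList s2.toList)]
  by_cases h0 : s1.toList.length = 0 ∧ s2.toList.length = 0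
  · rw [PySem.List.pyRange_neg_one_eq_nil (by omega),
      PySem.List.pyRange_neg_one_eq_nil (by omega)]
  · rw [pyRange_neg_one_append ((s1.toList.length : Int) - 1) (-(s2.toList.length : Int))
      (-(s2.toList.length : Int) - 1) (by omega) (by omega)]
    rw [PySem.List.pyRange_neg_one_cons
      (by omega : -(s2.toList.length : Int) - 1 < -(s2.toList.length : Int))]
    rw [PySem.List.pyRange_neg_one_eq_nil (le_refl (-(s2.toList.length : Int) - 1))]
    have hlast : contribB s1.toList s2.toList (-(s2.toList.length : Int)) = [] := by
      rw [← contribA_eq_contribB]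
      exact contribA_last s1.toList s2.toList
    simp only [List.flatMap_append, List.flatMap_cons, List.flatMap_nil, hlast,
      List.append_nil]
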